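-- pv_equiv track=rewrite | github.com/Web8080/AI_Powered_football_analytics | download_football_videos.py | is_football_video
-- ===== SOURCE A (Python) =====
-- def is_football_video(title: str) -> bool:
--     """Check if video title suggests it's a football match"""
--     football_keywords = [
--         'football', 'soccer', 'match', 'game', 'premier league', 'la liga',
--         'champions league', 'bundesliga', 'serie a', 'full match', 'highlights',
--         'vs', 'v', 'versus', 'real madrid', 'barcelona', 'manchester', 'liverpool',
--         'arsenal', 'chelsea', 'tottenham', 'bayern', 'juventus', 'milan'
--     ]
--
--     title_lower = title.lower()
--     return any(keyword in title_lower for keyword in football_keywords)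
-- ===== SOURCE B (Python) =====
-- FOOTBALL_KEYWORDS = [
--     'football', 'soccer', 'match', 'game', 'premier league', 'la liga',
--     'champions league', 'bundesliga', 'serie a', 'full match', 'highlights',
--     'vs', 'v', 'versus', 'real madrid', 'barcelona', 'manchester', 'liverpool',
--     'arsenal', 'chelsea', 'tottenham', 'bayern', 'juventus', 'milan'
-- ]
--
-- def _match_at(t, i, k):
--     """Hand-written check that keyword k occurs in t starting at index i."""
--     for j in range(len(k)):
--         if i + j >= len(t) or t[i + j] != k[j]:
--             return False
--     return True
--
-- def is_football_video(title: str) -> bool: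
--     """Explicit sliding scan: at each position of the lowercased title,
--     compare each keyword character by character (no substring built-in)."""
--     t = title.lower()
--     for i in range(len(t)):
--         for k in FOOTBALL_KEYWORDS:
--             if _match_at(t, i, k):
--                 return True
--     return False
-- ===== Notes on version B (the rewrite author's own statement) =====
-- stated objective: alternative
-- what changed: Replaces the per-keyword substring-membership test over the keyword list with an explicit sliding-window scan: an early-returning position loop over the lowercased title with a hand-written character-by-character prefix comparison at each position, using no substring built-in.
import Mathlib
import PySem

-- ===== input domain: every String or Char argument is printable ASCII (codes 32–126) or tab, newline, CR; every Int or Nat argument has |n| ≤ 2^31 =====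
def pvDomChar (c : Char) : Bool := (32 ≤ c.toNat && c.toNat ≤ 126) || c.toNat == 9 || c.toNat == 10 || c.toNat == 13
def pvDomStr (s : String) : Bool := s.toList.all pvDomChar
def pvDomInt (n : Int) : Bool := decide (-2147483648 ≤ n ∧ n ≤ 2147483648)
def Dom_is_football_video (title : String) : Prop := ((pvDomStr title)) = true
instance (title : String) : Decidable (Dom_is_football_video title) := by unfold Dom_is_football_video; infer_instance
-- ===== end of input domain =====

-- B replaces the per-keyword substring-membership loop with an explicit
-- sliding-window scan (hand-written char-by-char comparison at each position); objective: alternative.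

-- ===== PORT A =====
def pvKeywords : List String :=
  ["football", "soccer", "match", "game", "premier league", "la liga",
   "champions league", "bundesliga", "serie a", "full match", "highlights",
   "vs", "v", "versus", "real madrid", "barcelona", "manchester", "liverpool",
   "arsenal", "chelsea", "tottenham", "bayern", "juventus", "milan"]

-- the any(...) generator over football_keywords, testing substring membership per keyword
def is_football_video (title : String) : Bool :=
  let title_lower := PySem.Str.lower title
  pvKeywords.any (fun keyword => PySem.Str.isIn keyword title_lower)

-- ===== PORT B =====
-- B's keyword table, held as character lists for the hand-written comparison.
def pvKeywordsB : List (List Char) :=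
  List.map String.toList
    ["football", "soccer", "match", "game", "premier league", "la liga",
     "champions league", "bundesliga", "serie a", "full match", "highlights",
     "vs", "v", "versus", "real madrid", "barcelona", "manchester", "liverpool",
     "arsenal", "chelsea", "tottenham", "bayern", "juventus", "milan"]

-- _match_at: character-by-character comparison of a keyword against the suffix at a position.
def pvMatchAt : List Char → List Char → Bool
  | _, [] => true
  | [], _ :: _ => false
  | c :: cs, k :: ks => (c == k) && pvMatchAt cs ks

-- the early-returning 'for i in range(len(t))' loop: try all keywords at this position, else slide.
def pvScan : List Char → Bool
  | [] => false
  | c :: cs => pvKeywordsB.any (fun k => pvMatchAt (c :: cs) k) || pvScan cs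

def is_football_video_alt (title : String) : Bool :=
  pvScan (PySem.Chars.lower title.toList)

-- ===== PRECONDITION & SPEC =====
def Spec_is_football_video (title : String) (out : Bool) : Prop := out = is_football_video_alt title
instance (title : String) (out : Bool) : Decidable (Spec_is_football_video title out) := by unfold Spec_is_football_video; infer_instance

-- ===== CLAIM =====
def Claim_equal_is_football_video : Prop := ∀ (title : String), Dom_is_football_video title → Spec_is_football_video title (is_football_video title)

-- ===== LEMMAS AND PROOFS =====

theorem pvMatchAt_iff_prefix (k s : List Char) : pvMatchAt s k = true ↔ k <+: s := by
  induction k generalizing s with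
  | nil => simp [pvMatchAt]
  | cons x xs ih =>
    cases s with
    | nil => simp [pvMatchAt]
    | cons c cs =>
      simp only [pvMatchAt, Bool.and_eq_true, beq_iff_eq, ih, List.cons_prefix_cons]
      exact ⟨fun ⟨h1, h2⟩ => ⟨h1.symm, h2⟩, fun ⟨h1, h2⟩ => ⟨h1.symm, h2⟩⟩

theorem pvKeywordsB_nonempty : ∀ k ∈ pvKeywordsB, k ≠ [] := by decide

theorem pvScan_iff (s : List Char) :
    pvScan s = true ↔ ∃ k ∈ pvKeywordsB, ∃ j, k <+: s.drop j := by
  induction s with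
  | nil =>
    rw [show pvScan [] = false from rfl]
    simp only [Bool.false_eq_true, false_iff, List.drop_nil]
    rintro ⟨k, hk, _, hp⟩
    exact pvKeywordsB_nonempty k hk (List.prefix_nil.mp hp)
  | cons c cs ih =>
    simp only [pvScan, Bool.or_eq_true, List.any_eq_true, pvMatchAt_iff_prefix, ih]
    constructor
    · rintro (⟨k, hk, hp⟩ | ⟨k, hk, j, hp⟩)
      · exact ⟨k, hk, 0, hp⟩
      · exact ⟨k, hk, j + 1, hp⟩
    · rintro ⟨k, hk, j, hp⟩
      cases j with
      | zero => exact Or.inl ⟨k, hk, hp⟩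
      | succ n => exact Or.inr ⟨k, hk, n, hp⟩

theorem pvKeywordsB_eq : pvKeywordsB = pvKeywords.map String.toList := by decide

-- ===== VERDICT =====
theorem is_football_video_spec : Claim_equal_is_football_video := by
  intro title _
  unfold Spec_is_football_video is_football_video is_football_video_alt
  rw [Bool.eq_iff_iff, pvScan_iff]
  simp only [pvKeywordsB_eq, List.mem_map, List.any_eq_true, PySem.Str.isIn_eq,
    PySem.Str.toList_lower, ← PySem.Chars.exists_prefix_drop_iff_isIn]
  constructor
  · rintro ⟨k, hk, j, hj⟩
    exact ⟨k.toList, ⟨k, hk, rfl⟩, j, hj⟩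
  · rintro ⟨_, ⟨k, hk, rfl⟩, j, hj⟩
    exact ⟨k, hk, j, hj⟩
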